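-- pv_equiv track=rewrite | github.com/snowflakedb/snowpark-python | scripts/longprs.py | process_diff
-- ===== SOURCE A (Python) =====
-- def process_diff(diff_lines):
--     current_path = ""
--     adds = 0
--     dels = 0
--     del_run = 0
--     comment_run = 0
--     diff_by_file = dict()
--     for line in diff_lines.splitlines():
--         if line.startswith("diff"):
--             if len(current_path) > 0:
--                 diff_by_file[current_path] = (adds, dels)
--             current_path = line.split()[-1]
--             adds = 0
--             dels = 0
--             del_run = 0
--             comment_run = 0
--         elif line.startswith("+") and not line.startswith("+++"):
--             del_run = 0
--
--             # Ignore comment lines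
--             if line[1:].lstrip().startswith("#"):
--                 continue
--
--             adds = adds + 1
--             # Count runs of multi-line comments and subtract from total adds
--             # We do not want to penalize comments.
--             if comment_run > 0:
--                 comment_run = comment_run + 1
--             if '"""' in line:
--                 if comment_run > 0:
--                     adds = adds - comment_run
--                     comment_run = 0
--                 else:
--                     comment_run = 1
--         elif line.startswith("-") and not line.startswith("---"):
--             comment_run = 0
--             del_run = del_run + 1
--             # If we're seeing a large block of deletes, discount it
--             # We do not want to penalize diffs of large blocks of code.
--             if del_run < 30:
--                 dels = dels + 1
--         else:
--             del_run = 0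
--             comment_run = 0
--     if adds > 0 or dels > 0:
--         diff_by_file[current_path] = (adds, dels)
--
--     return diff_by_file
-- ===== SOURCE B (Python) =====
-- def _split(lines):
--     """Partition lines into per-file segments.
--
--     Returns (done, (path, cur)): 'done' holds every finished segment
--     (path, its lines) in order; (path, cur) is the still-open last segment.
--     Lines before the first 'diff' line form the open segment with path "".
--     """
--     done = []
--     path, cur = "", []
--     for line in lines:
--         if line.startswith("diff"):
--             done.append((path, cur))
--             path, cur = line.split()[-1], []
--         else:
--             cur.append(line)
--     return done, (path, cur)
--
--
-- def _count(seg):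
--     """Weighted adds/dels of one segment (no 'diff' lines inside)."""
--     adds = dels = del_run = comment_run = 0
--     for line in seg:
--         if line.startswith("+") and not line.startswith("+++"):
--             del_run = 0
--             if line[1:].lstrip().startswith("#"):
--                 continue
--             adds += 1
--             if comment_run > 0:
--                 comment_run += 1
--             if '"""' in line:
--                 if comment_run > 0:
--                     adds -= comment_run
--                     comment_run = 0
--                 else:
--                     comment_run = 1
--         elif line.startswith("-") and not line.startswith("---"):
--             comment_run = 0
--             del_run += 1
--             if del_run < 30:
--                 dels += 1
--         else:
--             del_run = 0
--             comment_run = 0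
--     return adds, dels
--
--
-- def process_diff(diff_lines):
--     done, (last_path, last_seg) = _split(diff_lines.splitlines())
--     result = {}
--     for path, seg in done:
--         if path:
--             result[path] = _count(seg)
--     adds, dels = _count(last_seg)
--     if adds > 0 or dels > 0:
--         result[last_path] = (adds, dels)
--     return result
-- ===== Notes on version B (the rewrite author's own statement) =====
-- stated objective: alternative
-- what changed: A counts everything in one pass with a six-field loop state and stores into the dict on the fly; B first partitions the lines into per-file segments, then counts each segment with a small four-field state machine and stores the segments in a second loop.
import Mathlib
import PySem

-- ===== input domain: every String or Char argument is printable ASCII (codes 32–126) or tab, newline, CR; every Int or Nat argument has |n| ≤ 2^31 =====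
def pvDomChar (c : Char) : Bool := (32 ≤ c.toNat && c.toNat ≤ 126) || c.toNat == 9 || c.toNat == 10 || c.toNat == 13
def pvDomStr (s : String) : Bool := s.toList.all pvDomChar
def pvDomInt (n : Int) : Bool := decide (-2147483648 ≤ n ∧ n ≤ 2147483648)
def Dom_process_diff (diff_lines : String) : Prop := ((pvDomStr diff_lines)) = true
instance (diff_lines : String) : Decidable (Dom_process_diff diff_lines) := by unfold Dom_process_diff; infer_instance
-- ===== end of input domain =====

-- B re-implements A by a different decomposition: split the lines into per-file segments first,
-- then count each segment with a small state machine and store the segments; same return value.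

-- ===== PORT A =====
-- one fold over the lines, carrying the whole Python loop state (path, adds, dels, del_run, comment_run, dict)
def stepA : String × Int × Int × Int × Int × PySem.Dict String (Int × Int) → String →
    String × Int × Int × Int × Int × PySem.Dict String (Int × Int)
  | (path, adds, dels, del_run, comment_run, d), line =>
    if PySem.Str.startswith line "diff" then
      let d' := if 0 < PySem.Str.len path then d.insert path (adds, dels) else d
      -- line.split()[-1]: the split of a line starting with "diff" is nonempty, so the "" default is unreachable
      (((PySem.List.pyGet? (PySem.Str.split₀ line) (-1)).getD ""), 0, 0, 0, 0, d')
    else if PySem.Str.startswith line "+" && !PySem.Str.startswith line "+++" then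
      if PySem.Str.startswith (PySem.Str.lstrip (PySem.Str.slice line (some 1) none)) "#" then
        (path, adds, dels, 0, comment_run, d)  -- continue (del_run was set to 0)
      else
        let adds := adds + 1
        let comment_run := if comment_run > 0 then comment_run + 1 else comment_run
        if PySem.Str.isIn "\"\"\"" line then
          if comment_run > 0 then (path, adds - comment_run, dels, 0, 0, d)
          else (path, adds, dels, 0, 1, d)
        else (path, adds, dels, 0, comment_run, d)
    else if PySem.Str.startswith line "-" && !PySem.Str.startswith line "---" then
      let del_run := del_run + 1
      if del_run < 30 then (path, adds, dels + 1, del_run, 0, d)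
      else (path, adds, dels, del_run, 0, d)
    else
      (path, adds, dels, 0, 0, d)

def process_diff (diff_lines : String) : List (String × Int × Int) :=
  match (PySem.Str.splitlines diff_lines).foldl stepA ("", 0, 0, 0, 0, PySem.Dict.empty) with
  | (path, adds, dels, _, _, d) =>
    (if adds > 0 ∨ dels > 0 then d.insert path (adds, dels) else d).items

-- ===== PORT B =====
-- _split: partition the lines into finished segments plus the open last segment
def splitSegs : List String → String → List String →
    List (String × List String) × (String × List String)
  | [], path, cur => ([], (path, cur))
  | l :: rest, path, cur =>
    if PySem.Str.startswith l "diff" then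
      let r := splitSegs rest ((PySem.List.pyGet? (PySem.Str.split₀ l) (-1)).getD "") []
      ((path, cur) :: r.1, r.2)
    else
      splitSegs rest path (cur ++ [l])

-- _count's per-line state machine on (adds, dels, del_run, comment_run)
def stepC : Int × Int × Int × Int → String → Int × Int × Int × Int
  | (adds, dels, del_run, comment_run), line =>
    if PySem.Str.startswith line "+" && !PySem.Str.startswith line "+++" then
      if PySem.Str.startswith (PySem.Str.lstrip (PySem.Str.slice line (some 1) none)) "#" then
        (adds, dels, 0, comment_run)
      else
        let adds := adds + 1
        let comment_run := if comment_run > 0 then comment_run + 1 else comment_run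
        if PySem.Str.isIn "\"\"\"" line then
          if comment_run > 0 then (adds - comment_run, dels, 0, 0)
          else (adds, dels, 0, 1)
        else (adds, dels, 0, comment_run)
    else if PySem.Str.startswith line "-" && !PySem.Str.startswith line "---" then
      let del_run := del_run + 1
      if del_run < 30 then (adds, dels + 1, del_run, 0)
      else (adds, dels, del_run, 0)
    else (adds, dels, 0, 0)

def countSeg (seg : List String) : Int × Int :=
  match seg.foldl stepC (0, 0, 0, 0) with
  | (adds, dels, _, _) => (adds, dels)

def process_diff_alt (diff_lines : String) : List (String × Int × Int) :=
  match splitSegs (PySem.Str.splitlines diff_lines) "" [] with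
  | (done, (last_path, last_seg)) =>
    let d := done.foldl
      (fun d ps => if ps.1 ≠ "" then d.insert ps.1 (countSeg ps.2) else d)
      (PySem.Dict.empty : PySem.Dict String (Int × Int))
    match countSeg last_seg with
    | (adds, dels) =>
      (if adds > 0 ∨ dels > 0 then d.insert last_path (adds, dels) else d).items

-- ===== PRECONDITION & SPEC =====
def Spec_process_diff (diff_lines : String) (out : List (String × Int × Int)) : Prop := out = process_diff_alt diff_lines
instance (diff_lines : String) (out : List (String × Int × Int)) : Decidable (Spec_process_diff diff_lines out) := by unfold Spec_process_diff; infer_instance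

-- ===== CLAIM (what is proved, stated in full; the proofs are below) =====
def Claim_equal_process_diff : Prop := ∀ (diff_lines : String), Dom_process_diff diff_lines → Spec_process_diff diff_lines (process_diff diff_lines)

-- ===== LEMMAS AND PROOFS =====

-- proof-side helpers: A's final store, B's build over the split result
def finishA (st : String × Int × Int × Int × Int × PySem.Dict String (Int × Int)) :
    List (String × Int × Int) :=
  match st with
  | (path, adds, dels, _, _, d) =>
    (if adds > 0 ∨ dels > 0 then d.insert path (adds, dels) else d).items

def buildB (d : PySem.Dict String (Int × Int))
    (pr : List (String × List String) × (String × List String)) : List (String × Int × Int) :=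
  match pr with
  | (done, (last_path, last_seg)) =>
    let d := done.foldl (fun d ps => if ps.1 ≠ "" then d.insert ps.1 (countSeg ps.2) else d) d
    match countSeg last_seg with
    | (adds, dels) =>
      (if adds > 0 ∨ dels > 0 then d.insert last_path (adds, dels) else d).items
theorem len_pos_iff_ne_empty (p : String) : 0 < PySem.Str.len p ↔ ¬p = "" := by
  have h1 : PySem.Str.len p = (p.toList.length : Int) := by simp [pysem]
  rw [h1]
  constructor
  · intro h he; subst he; simp at h
  · intro h
    have hne : p.toList ≠ [] := fun he => h (String.toList_inj.mp (by rw [he]; rfl))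
    exact_mod_cast List.length_pos_iff.mpr hne

set_option maxHeartbeats 1000000 in
theorem step_agree (line path : String) (a de dr cr : Int)
    (d : PySem.Dict String (Int × Int))
    (h : PySem.Str.startswith line "diff" = false) :
    stepA (path, a, de, dr, cr, d) line =
      (path, (stepC (a, de, dr, cr) line).1, (stepC (a, de, dr, cr) line).2.1,
        (stepC (a, de, dr, cr) line).2.2.1, (stepC (a, de, dr, cr) line).2.2.2, d) := by
  simp only [stepA, stepC, h, Bool.false_eq_true, if_false]
  split_ifs <;> rfl

theorem stepA_diff (line path : String) (a de dr cr : Int)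
    (d : PySem.Dict String (Int × Int))
    (h : PySem.Str.startswith line "diff" = true) :
    stepA (path, a, de, dr, cr, d) line =
      (((PySem.List.pyGet? (PySem.Str.split₀ line) (-1)).getD ""), 0, 0, 0, 0,
        if 0 < PySem.Str.len path then d.insert path (a, de) else d) := by
  simp only [stepA, h, if_true]

theorem countSeg_mk (seg : List String) (a de dr cr : Int)
    (h : seg.foldl stepC (0, 0, 0, 0) = (a, de, dr, cr)) : countSeg seg = (a, de) := by
  simp [countSeg, h]

set_option maxHeartbeats 1000000 in
theorem main_invariant (ls : List String) (path : String) (cur : List String)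
    (d : PySem.Dict String (Int × Int)) :
    finishA (ls.foldl stepA
      (path, (cur.foldl stepC (0, 0, 0, 0)).1, (cur.foldl stepC (0, 0, 0, 0)).2.1,
        (cur.foldl stepC (0, 0, 0, 0)).2.2.1, (cur.foldl stepC (0, 0, 0, 0)).2.2.2, d))
    = buildB d (splitSegs ls path cur) := by
  induction ls generalizing path cur d with
  | nil =>
    rcases hc : cur.foldl stepC (0, 0, 0, 0) with ⟨a, de, dr, cr⟩
    dsimp only
    simp [finishA, buildB, splitSegs, countSeg_mk cur a de dr cr hc]
  | cons l rest ih =>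
    rcases hc : cur.foldl stepC (0, 0, 0, 0) with ⟨a, de, dr, cr⟩
    dsimp only
    rw [List.foldl_cons]
    by_cases hd : PySem.Str.startswith l "diff"
    · rw [stepA_diff l path a de dr cr d hd]
      have hins : (if 0 < PySem.Str.len path then d.insert path (a, de) else d)
          = (if path ≠ "" then d.insert path (countSeg cur) else d) := by
        rw [countSeg_mk cur a de dr cr hc]
        exact if_congr (len_pos_iff_ne_empty path) rfl rfl
      rw [hins]
      have h := ih ((PySem.List.pyGet? (PySem.Str.split₀ l) (-1)).getD "") []
        (if path ≠ "" then d.insert path (countSeg cur) else d)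
      rw [show (([] : List String).foldl stepC (0, 0, 0, 0)) = ((0:Int),(0:Int),(0:Int),(0:Int)) from rfl] at h
      rw [h]
      simp only [splitSegs, hd, if_true]
      rfl
    · rw [step_agree l path a de dr cr d (by simpa using hd)]
      have hc' : (cur ++ [l]).foldl stepC (0, 0, 0, 0) = stepC (a, de, dr, cr) l := by
        rw [List.foldl_append, hc]; rfl
      have h := ih path (cur ++ [l]) d
      rw [hc'] at h
      rw [h]
      simp only [splitSegs, hd, Bool.false_eq_true, if_false]

-- ===== VERDICT (by name: the statement is the Claim_ definition above) =====
theorem process_diff_spec : Claim_equal_process_diff := by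
  intro s _
  show process_diff s = process_diff_alt s
  have hA : process_diff s = finishA ((PySem.Str.splitlines s).foldl stepA ("", 0, 0, 0, 0, PySem.Dict.empty)) := by
    unfold process_diff finishA
    rcases (PySem.Str.splitlines s).foldl stepA ("", 0, 0, 0, 0, PySem.Dict.empty) with ⟨p, a, de, dr, cr, d⟩
    rfl
  have hB : process_diff_alt s = buildB PySem.Dict.empty (splitSegs (PySem.Str.splitlines s) "" []) := by
    unfold process_diff_alt buildB
    rcases splitSegs (PySem.Str.splitlines s) "" [] with ⟨done, lp, lseg⟩
    rfl
  rw [hA, hB]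
  exact main_invariant (PySem.Str.splitlines s) "" [] PySem.Dict.empty
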